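-- pv_equiv track=rewrite | github.com/krmstrong322/NCL_RA_Interview | SequenceDesigner/scaffold_generator.py | consecutive_g_count
-- ===== SOURCE A (Python) =====
-- import itertools
--
-- def consecutive_g_count(sequence):
--
--     consecutive_G = 0
--
--     counter = ([[k, len(list(g))] for k, g in itertools.groupby(sequence)])
--     #G_counter = [char for char in counter if counter [0]=="G"]
--     for char in counter:
--         if char[0] == "G":
--             G_count = char[1]
--             if G_count >= consecutive_G:
--                 consecutive_G = G_count
--
--     return consecutive_G
-- ===== SOURCE B (Python) =====
-- def consecutive_g_count(sequence):
--     best = 0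
--     cur = 0
--     for ch in sequence:
--         cur = cur + 1 if ch == "G" else 0
--         if cur > best:
--             best = cur
--     return best
-- ===== Notes on version B (the rewrite author's own statement) =====
-- stated objective: simpler
-- what changed: Replaces the itertools.groupby run-length list plus a second scan over the groups with one direct pass over the characters maintaining only a current-run counter and a best counter.
import Mathlib
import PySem

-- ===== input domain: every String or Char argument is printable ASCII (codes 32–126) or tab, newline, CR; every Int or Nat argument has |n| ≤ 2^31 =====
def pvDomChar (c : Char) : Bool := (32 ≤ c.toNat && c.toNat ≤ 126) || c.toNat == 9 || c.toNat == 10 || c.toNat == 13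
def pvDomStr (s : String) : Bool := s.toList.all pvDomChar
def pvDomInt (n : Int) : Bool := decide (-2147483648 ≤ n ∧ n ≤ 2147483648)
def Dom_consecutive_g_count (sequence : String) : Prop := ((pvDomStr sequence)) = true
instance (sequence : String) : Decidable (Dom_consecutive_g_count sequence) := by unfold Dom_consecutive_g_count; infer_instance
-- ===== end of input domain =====

-- B replaces A's groupby-built list of runs (and the scan over it) with one direct pass
-- keeping only a current-run counter and a best counter; same O(n) cost, simpler.

-- ===== PORT A =====
-- itertools.groupby over the characters, as [(key, run length)] pairs
def pyGroupBy : List Char → List (Char × Int)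
  | [] => []
  | c :: cs =>
    (c, 1 + (cs.takeWhile (· == c)).length) :: pyGroupBy (cs.dropWhile (· == c))
termination_by l => l.length
decreasing_by
  simpa using Nat.lt_succ_of_le (List.length_dropWhile_le _ _)

def consecutive_g_count (sequence : String) : Int :=
  let counter := pyGroupBy sequence.toList
  counter.foldl
    (fun consecutive_G char =>
      if char.1 = 'G' then
        let G_count := char.2
        if G_count ≥ consecutive_G then G_count else consecutive_G
      else consecutive_G)
    0

-- ===== PORT B =====
-- one pass: state = (best, cur)
def consecutive_g_count_alt (sequence : String) : Int :=
  (sequence.toList.foldl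
    (fun (s : Int × Int) ch =>
      let cur := if ch = 'G' then s.2 + 1 else 0
      (max s.1 cur, cur))
    (0, 0)).1

-- ===== PRECONDITION & SPEC =====
def Spec_consecutive_g_count (sequence : String) (out : Int) : Prop := out = consecutive_g_count_alt sequence
instance (sequence : String) (out : Int) : Decidable (Spec_consecutive_g_count sequence out) := by unfold Spec_consecutive_g_count; infer_instance

-- ===== CLAIM (what is proved, stated in full; the proofs are below) =====
def Claim_equal_consecutive_g_count : Prop := ∀ (sequence : String), Dom_consecutive_g_count sequence → Spec_consecutive_g_count sequence (consecutive_g_count sequence)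

-- ===== LEMMAS AND PROOFS =====

-- abbreviations for the two fold bodies (proof-side only)
def stepA (acc : Int) (char : Char × Int) : Int :=
  if char.1 = 'G' then
    if char.2 ≥ acc then char.2 else acc
  else acc

def stepB (s : Int × Int) (ch : Char) : Int × Int :=
  let cur := if ch = 'G' then s.2 + 1 else 0
  (max s.1 cur, cur)

lemma stepA_eq_max (acc : Int) (char : Char × Int) :
    stepA acc char = if char.1 = 'G' then max acc char.2 else acc := by
  unfold stepA
  split_ifs <;> omega

-- B's fold through a block of 'G's: cur and best advance by the block length
lemma foldB_G_run (run rest : List Char) (h : ∀ x ∈ run, x = 'G')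
    (best cur : Int) :
    (run ++ rest).foldl stepB (max best cur, cur)
      = rest.foldl stepB (max best (cur + run.length), cur + run.length) := by
  induction run generalizing cur with
  | nil => simp
  | cons c cs ih =>
    have hc : c = 'G' := h c (by simp)
    subst hc
    have hstep : stepB (max best cur, cur) 'G' = (max best (cur + 1), cur + 1) := by
      simp [stepB]
    have hlen : cur + 1 + (cs.length : Int) = cur + (('G' :: cs).length : Int) := by
      simp only [List.length_cons]; push_cast; ring
    rw [List.cons_append, List.foldl_cons, hstep,
      ih (fun x hx => h x (List.mem_cons_of_mem _ hx)) (cur + 1), hlen]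

-- B's fold through a block of non-'G's: state stays (best, 0) given 0 ≤ best
lemma foldB_nonG_run (run rest : List Char) (h : ∀ x ∈ run, x ≠ 'G')
    (best : Int) (hb : 0 ≤ best) :
    (run ++ rest).foldl stepB (best, 0) = rest.foldl stepB (best, 0) := by
  induction run with
  | nil => simp
  | cons c cs ih =>
    have hc : c ≠ 'G' := h c (by simp)
    simp only [List.cons_append, List.foldl_cons, stepB, if_neg hc]
    rw [show max best 0 = best by omega]
    exact ih (fun x hx => h x (by simp [hx]))

-- a reset: if the next character is not 'G', the incoming cur is irrelevant
lemma foldB_reset (l : List Char) (hl : ∀ c, l.head? = some c → c ≠ 'G')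
    (best cur : Int) :
    (l.foldl stepB (best, cur)).1 = (l.foldl stepB (best, 0)).1 := by
  cases l with
  | nil => rfl
  | cons c cs =>
    have hc : c ≠ 'G' := hl c rfl
    simp [stepB, if_neg hc]

lemma dropWhile_head_ne (c : Char) (cs : List Char) (d : Char)
    (hd : (cs.dropWhile (· == c)).head? = some d) : d ≠ 'G' ∨ c ≠ 'G' := by
  by_cases h : c = 'G'
  · left
    have := List.head?_dropWhile_not (p := (· == c)) (l := cs)
    rw [hd] at this
    intro hdg
    subst h hdg
    simp at this
  · right; exact h

-- main lemma: A's fold over the groups equals B's one-pass fold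
lemma main_lemma : ∀ (n : ℕ) (l : List Char) (best : Int), l.length ≤ n → 0 ≤ best →
    (l.foldl stepB (best, 0)).1 = (pyGroupBy l).foldl stepA best := by
  intro n
  induction n with
  | zero =>
    intro l best hn _
    have : l = [] := List.eq_nil_of_length_eq_zero (Nat.le_zero.mp hn)
    subst this
    simp [pyGroupBy]
  | succ n ih =>
    intro l best hn hb
    cases l with
    | nil => simp [pyGroupBy]
    | cons c cs =>
      rw [pyGroupBy]
      set run := cs.takeWhile (· == c) with hrun
      set rest := cs.dropWhile (· == c) with hrest
      have hsplit : cs = run ++ rest := (List.takeWhile_append_dropWhile).symm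
      have hrestlen : rest.length ≤ n := by
        have h1 : rest.length ≤ cs.length := by
          rw [hrest]; exact List.length_dropWhile_le _ _
        have h2 : cs.length ≤ n := by simpa using hn
        omega
      have hrunmem : ∀ x ∈ run, x = c := fun x hx => by
        have := List.mem_takeWhile_imp hx
        simpa using this
      have hresthead : ∀ d, rest.head? = some d → d ≠ 'G' ∨ c ≠ 'G' :=
        fun d hd => dropWhile_head_ne c cs d hd
      simp only [List.foldl_cons, stepA_eq_max]
      by_cases hc : c = 'G'
      · -- the group is a G-run of length 1 + run.length
        subst hc
        rw [hsplit]
        have h0 : stepB (best, 0) 'G' = (max best 1, 1) := by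
          simp [stepB]
        simp only [h0]
        rw [foldB_G_run run rest (fun x hx => hrunmem x hx) best 1]
        have hhead : ∀ d, rest.head? = some d → d ≠ 'G' := by
          intro d hd
          rcases hresthead d hd with h | h
          · exact h
          · exact absurd rfl h
        rw [foldB_reset rest hhead]
        rw [ih rest _ hrestlen (le_trans hb (le_max_left _ _))]
        simp
      · -- the group is a non-G run; both sides keep best
        simp only [if_neg hc]
        rw [hsplit]
        have h0 : stepB (best, 0) c = (best, 0) := by
          simp [stepB, if_neg hc, Prod.ext_iff]
          omega
        simp only [h0]
        rw [foldB_nonG_run run rest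
          (fun x hx => by rw [hrunmem x hx]; exact hc) best hb]
        exact ih rest best hrestlen hb

-- the ports are these folds
lemma portA_eq (sequence : String) :
    consecutive_g_count sequence = (pyGroupBy sequence.toList).foldl stepA 0 := rfl

lemma portB_eq (sequence : String) :
    consecutive_g_count_alt sequence = (sequence.toList.foldl stepB (0, 0)).1 := rfl

-- ===== VERDICT (by name: the statement is the Claim_ definition above) =====
theorem consecutive_g_count_spec : Claim_equal_consecutive_g_count := by
  intro sequence _
  unfold Spec_consecutive_g_count
  rw [portA_eq, portB_eq]
  exact (main_lemma sequence.toList.length sequence.toList 0 le_rfl le_rfl).symm
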